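-- pv_equiv track=rewrite | github.com/IsmaelNicolas/EmployMe | ApiGateway/Utils/Services.py | validate_route
-- ===== SOURCE A (Python) =====
-- def validate_route(route: str):
--     if route.endswith('/') or '//' in route:
--         return False,False  # No puede terminar en '/' ni tener dos barras consecutivas '//'
--
--     special = {'{', '}', '/'}
--     open_bracket = 0
--     previous_char = None
--     for char in route:
--         if previous_char == char and char in special:
--             return False,False  # Dos caracteres especiales seguidos
--
--         if char == '{':
--             open_bracket += 1
--
--         if char == '}':
--             if open_bracket == 0:
--                 return False ,False # Paréntesis cerrado sin paréntesis abierto previo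
--             open_bracket -= 1
--
--         previous_char = char
--
--     return open_bracket == 0 and route.count('{') == route.count('}') ,  '{' in route # Paréntesis abierto sin paréntesis cerrado posterior
-- ===== SOURCE B (Python) =====
-- def _seq(it):
--     # recursive-descent over a shared character iterator: consume balanced groups;
--     # 'end' = input exhausted, 'close' = stopped at a '}', None = an unclosed '{'
--     for c in it:
--         if c == '}':
--             return 'close'
--         if c == '{':
--             r = _seq(it)
--             if r != 'close':
--                 return None
--     return 'end'
--
--
-- def validate_route(route: str):
--     if route.endswith('/') or '//' in route or '{{' in route or '}}' in route:
--         return False, False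
--     r = _seq(iter(route))
--     if r is None:
--         return False, True
--     if r == 'close':
--         return False, False
--     return True, '{' in route
-- ===== Notes on version B (the rewrite author's own statement) =====
-- stated objective: alternative
-- what changed: A fuses everything into one counter-based scan with previous_char/open_bracket state; B instead rejects the forbidden two-character substrings ('//', '{{', '}}') by substring membership tests and then checks bracket matching with a recursive-descent parser over a shared character iterator, distinguishing a stray '}' (parser stops at it) from an unclosed '{' (parser returns None).
import Mathlib
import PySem

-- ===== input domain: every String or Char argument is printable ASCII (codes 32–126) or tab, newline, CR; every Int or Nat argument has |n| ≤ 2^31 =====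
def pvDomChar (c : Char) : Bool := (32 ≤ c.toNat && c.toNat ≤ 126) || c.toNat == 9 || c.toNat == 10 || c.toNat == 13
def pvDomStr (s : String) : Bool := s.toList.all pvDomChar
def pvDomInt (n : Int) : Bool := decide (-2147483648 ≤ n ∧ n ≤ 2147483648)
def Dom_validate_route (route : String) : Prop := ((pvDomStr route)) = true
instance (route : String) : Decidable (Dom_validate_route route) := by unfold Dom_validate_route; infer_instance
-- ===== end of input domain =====

-- B replaces A's fused counter scan by forbidden-substring membership guards plus a
-- recursive-descent parser that consumes balanced brace groups (objective: alternative).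

-- ===== PORT A =====
-- A's `special = {'{', '}', '/'}` set literal
def vrSpecial : PySem.Set Char := PySem.Set.ofList ['{', '}', '/']

-- A's for-loop: state = previous_char (Option Char) and open_bracket (Nat); the final return
-- mentions the whole `route`, so it is passed along unchanged.
def vrLoopA (route : String) (prev : Option Char) (ob : Nat) : List Char → Bool × Bool
  | [] => (decide (ob = 0 ∧ PySem.Str.count route "{" = PySem.Str.count route "}"),
           PySem.Str.isIn "{" route)
  | c :: rest =>
    if prev == some c && vrSpecial.contains c then (false, false)
    else
      let ob := if c == '{' then ob + 1 else ob
      if c == '}' then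
        if ob = 0 then (false, false) else vrLoopA route (some c) (ob - 1) rest
      else vrLoopA route (some c) ob rest

def validate_route (route : String) : Bool × Bool :=
  if PySem.Str.endswith route "/" || PySem.Str.isIn "//" route then (false, false)
  else vrLoopA route none 0 route.toList

-- ===== PORT B =====
-- B's `_seq`: recursive descent over a shared iterator, modelled as the remaining character
-- list. `some (true, rest)` = returned 'close' (a '}' was consumed, iterator state rest),
-- `some (false, rest)` = returned 'end' (input exhausted), `none` = Python's None (unclosed
-- '{'). The fuel argument only makes the nested recursion structurally total; it is called
-- with the list length and never runs out (vrSeqF_char never reaches the fuel-out arm).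
def vrSeqF : Nat → List Char → Option (Bool × List Char)
  | _, [] => some (false, [])
  | 0, _ :: _ => none
  | f + 1, c :: cs =>
    if c = '}' then some (true, cs)
    else if c = '{' then
      match vrSeqF f cs with
      | some (true, rest) => vrSeqF f rest
      | _ => none
    else vrSeqF f cs

def validate_route_alt (route : String) : Bool × Bool :=
  if PySem.Str.endswith route "/" || PySem.Str.isIn "//" route
      || PySem.Str.isIn "{{" route || PySem.Str.isIn "}}" route then (false, false)
  else
    match vrSeqF route.toList.length route.toList with
    | none => (false, true)
    | some (true, _) => (false, false)
    | some (false, _) => (true, PySem.Str.isIn "{" route)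

-- ===== PRECONDITION & SPEC =====
def Spec_validate_route (route : String) (out : Bool × Bool) : Prop := out = validate_route_alt route
instance (route : String) (out : Bool × Bool) : Decidable (Spec_validate_route route out) := by unfold Spec_validate_route; infer_instance

-- ===== CLAIM (what is proved, stated in full; the proofs are below) =====
def Claim_equal_validate_route : Prop := ∀ (route : String), Dom_validate_route route → Spec_validate_route route (validate_route route)

-- ===== LEMMAS AND PROOFS =====

-- A's pair test as seen mid-loop, with the pending previous character.
def vrPairFrom (prev : Option Char) : List Char → Bool
  | [] => false
  | c :: rest => (prev == some c && vrSpecial.contains c) || vrPairFrom (some c) rest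

-- depth view of A's counter (proof-only abstraction used to connect the two ports)
def vrDepth (d : Int) : List Char → Option Int
  | [] => some d
  | c :: rest =>
    if c = '{' then vrDepth (d + 1) rest
    else if c = '}' then
      let d := d - 1
      if d < 0 then none else vrDepth d rest
    else vrDepth d rest

-- B's duplicated-special test, scan form (proof-only bridge between A's prev state and substrings)
def vrPairBad : List Char -> Bool
  | a :: b :: rest =>
    if a == b && vrSpecial.contains a then true else vrPairBad (b :: rest)
  | _ => false

theorem vrPairFrom_some (a : Char) (l : List Char) :
    vrPairFrom (some a) l = vrPairBad (a :: l) := by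
  induction l generalizing a with
  | nil => rfl
  | cons b rest ih =>
    simp only [vrPairFrom, vrPairBad, ih]
    by_cases h : a = b
    · subst h; simp
    · simp [h]

theorem vrPairFrom_none (l : List Char) : vrPairFrom none l = vrPairBad l := by
  cases l with
  | nil => rfl
  | cons c rest => simp [vrPairFrom, vrPairFrom_some]

theorem vrPairBad_iff (l : List Char) :
    vrPairBad l = true ↔ ∃ c ∈ (['{', '}', '/'] : List Char), [c, c] <:+: l := by
  induction l with
  | nil =>
    simp only [vrPairBad, Bool.false_eq_true, false_iff]
    rintro ⟨c, _, h⟩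
    have := h.length_le; simp at this
  | cons a tail ih =>
    cases tail with
    | nil =>
      simp only [vrPairBad, Bool.false_eq_true, false_iff]
      rintro ⟨c, _, h⟩
      have := h.length_le; simp at this
    | cons b rest =>
      simp only [vrPairBad]
      by_cases hab : (a == b && vrSpecial.contains a) = true
      · simp only [hab, if_true, true_iff]
        obtain ⟨hab', hsp⟩ := Bool.and_eq_true_iff.mp hab
        have hab'' : a = b := beq_iff_eq.mp hab'
        subst hab''
        refine ⟨a, ?_, ⟨[], rest, rfl⟩⟩
        have : a ∈ vrSpecial := (PySem.Set.contains_iff _ _).mp hsp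
        simpa [vrSpecial, PySem.Set.mem_ofList] using this
      · rw [if_neg hab, ih]
        constructor
        · rintro ⟨c, hc, hinf⟩
          exact ⟨c, hc, hinf.trans ((b :: rest).suffix_cons a).isInfix⟩
        · rintro ⟨c, hc, hinf⟩
          rcases List.infix_cons_iff.mp hinf with hpre | hinf'
          · obtain ⟨t, ht⟩ := hpre
            simp only [List.cons_append, List.nil_append, List.cons.injEq] at ht
            obtain ⟨rfl, rfl, -⟩ := ht
            exact absurd (Bool.and_eq_true_iff.mpr ⟨beq_iff_eq.mpr rfl,
              (PySem.Set.contains_iff _ _).mpr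
                (by simpa [vrSpecial, PySem.Set.mem_ofList] using hc)⟩) hab
          · exact ⟨c, hc, hinf'⟩

-- singleton-substring count is element count
theorem vrCountGo_singleton (c : Char) (l : List Char) :
    ∀ (fuel acc : Nat), l.length ≤ fuel →
      PySem.Chars.count.go [c] fuel l acc = acc + l.count c := by
  induction l with
  | nil => intro fuel acc _; cases fuel <;> simp [PySem.Chars.count.go]
  | cons a rest ih =>
    intro fuel acc hf
    cases fuel with
    | zero => simp at hf
    | succ f =>
      have hf' : rest.length ≤ f := by simpa using hf
      by_cases h : a = c
      · subst h
        simp [PySem.Chars.count.go, List.isPrefixOf, ih _ _ hf']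
        omega
      · have : ([c].isPrefixOf (a :: rest)) = false := by
          simp [List.isPrefixOf]; exact fun hh => h (by simpa using hh.symm)
        simp [PySem.Chars.count.go, this, ih _ _ hf', h]

theorem vrCount_singleton (c : Char) (l : List Char) :
    PySem.Chars.count l [c] = l.count c := by
  simp [PySem.Chars.count, vrCountGo_singleton c l l.length _ le_rfl]

-- vrDepth returns the running bracket balance when it never goes negative
theorem vrDepth_spec (l : List Char) :
    ∀ (d0 d : Int), vrDepth d0 l = some d →
      d = d0 + (l.count '{' : Int) - (l.count '}' : Int) := by
  induction l with
  | nil => intro d0 d h; simp [vrDepth] at h; simp [h]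
  | cons c rest ih =>
    intro d0 d h
    by_cases h1 : c = '{'
    · subst h1; simp [vrDepth] at h
      have := ih _ _ h
      simp; omega
    · by_cases h2 : c = '}'
      · subst h2
        simp [vrDepth, h1] at h
        rcases h with ⟨hnn, h⟩
        have := ih _ _ h
        simp [h1]; omega
      · simp [vrDepth, h1, h2] at h
        have := ih _ _ h
        simp [h1, h2]; omega

-- A's fused loop = pair check, then depth pass
theorem vrLoopA_eq (route : String) (l : List Char) :
    ∀ (prev : Option Char) (ob : Nat),
      vrLoopA route prev ob l =
        if vrPairFrom prev l then (false, false)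
        else
          match vrDepth (ob : Int) l with
          | none => (false, false)
          | some d => (decide (d = 0 ∧ PySem.Str.count route "{" = PySem.Str.count route "}"),
                       PySem.Str.isIn "{" route) := by
  induction l with
  | nil =>
    intro prev ob
    simp [vrLoopA, vrPairFrom, vrDepth]
  | cons c rest ih =>
    intro prev ob
    by_cases hb : (prev == some c && vrSpecial.contains c) = true
    · have ht : vrPairFrom prev (c :: rest) = true := by
        simp only [vrPairFrom, hb, Bool.true_or]
      simp only [vrLoopA, hb, ht, if_true]
    · have hb' : (prev == some c && vrSpecial.contains c) = false := by
        cases h : (prev == some c && vrSpecial.contains c)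
        · rfl
        · exact absurd h hb
      have hpf : vrPairFrom prev (c :: rest) = vrPairFrom (some c) rest := by
        simp only [vrPairFrom, hb', Bool.false_or]
      rw [hpf]
      by_cases h1 : c = '{'
      · subst h1
        have step : vrLoopA route prev ob ('{' :: rest) =
            vrLoopA route (some '{') (ob + 1) rest := by
          simp only [vrLoopA]
          rw [if_neg hb]
          simp
        have hd : vrDepth (ob : Int) ('{' :: rest) = vrDepth ((ob + 1 : Nat) : Int) rest := by
          simp [vrDepth]
        rw [step, ih, hd]
      · by_cases h2 : c = '}'
        · subst h2
          cases ob with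
          | zero =>
            have step : vrLoopA route prev 0 ('}' :: rest) = (false, false) := by
              simp only [vrLoopA]
              rw [if_neg hb]
              simp
            have hd : vrDepth ((0 : Nat) : Int) ('}' :: rest) = none := rfl
            rw [step, hd]
            cases vrPairFrom (some '}') rest <;> rfl
          | succ k =>
            have step : vrLoopA route prev (k + 1) ('}' :: rest) =
                vrLoopA route (some '}') k rest := by
              simp only [vrLoopA]
              rw [if_neg hb]
              simp
            have hnn : ¬ (((k + 1 : Nat) : Int) - 1 < 0) := by push_cast; omega
            have heq : ((k + 1 : Nat) : Int) - 1 = ((k : Nat) : Int) := by push_cast; omega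
            have hk : ¬ ((k : Int) < 0) := by omega
            have hd : vrDepth ((k + 1 : Nat) : Int) ('}' :: rest) = vrDepth ((k : Nat) : Int) rest := by
              simp [vrDepth, hk]
            rw [step, ih, hd]
        · have e1 : (c == '{') = false := by simp [h1]
          have e2 : (c == '}') = false := by simp [h2]
          have step : vrLoopA route prev ob (c :: rest) = vrLoopA route (some c) ob rest := by
            simp only [vrLoopA, e1, e2, Bool.false_eq_true, if_false]
            rw [if_neg hb]
          have hd : vrDepth (ob : Int) (c :: rest) = vrDepth (ob : Int) rest := by
            simp only [vrDepth, h1, h2, if_false]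
          rw [step, ih, hd]

-- the characterization of B's recursive parser in terms of vrDepth
theorem vrSeqF_char : ∀ (f : Nat) (l : List Char), l.length ≤ f → ∀ (d : Int), 0 ≤ d →
    (match vrSeqF f l with
     | some (false, _) => vrDepth d l = some d
     | some (true, r) => r.length < l.length ∧
         vrDepth d l = (if d - 1 < 0 then none else vrDepth (d - 1) r)
     | none => ∃ e, vrDepth d l = some e ∧ d < e) := by
  intro f
  induction f with
  | zero =>
    intro l hl d hd
    cases l with
    | nil => simp [vrSeqF, vrDepth]
    | cons c cs => simp at hl
  | succ f ih =>
    intro l hl d hd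
    cases l with
    | nil => simp [vrSeqF, vrDepth]
    | cons c cs =>
      have hcs : cs.length ≤ f := by simpa using hl
      by_cases h2 : c = '}'
      · subst h2
        simp only [vrSeqF]
        refine ⟨by simp, ?_⟩
        simp [vrDepth]
      · by_cases h1 : c = '{'
        · subst h1
          have hstep : vrDepth d ('{' :: cs) = vrDepth (d + 1) cs := by simp [vrDepth]
          have hseq : vrSeqF (f + 1) ('{' :: cs) =
              (match vrSeqF f cs with
               | some (true, rest) => vrSeqF f rest
               | _ => none) := by
            simp [vrSeqF]
          have hIH := ih cs hcs (d + 1) (by omega)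
          cases hres : vrSeqF f cs with
          | none =>
            rw [hres] at hIH
            obtain ⟨e, he, hlt⟩ := hIH
            rw [hseq, hres]
            exact ⟨e, by rw [hstep]; exact he, by omega⟩
          | some pr =>
            obtain ⟨b, r'⟩ := pr
            cases b with
            | false =>
              rw [hres] at hIH
              rw [hseq, hres]
              exact ⟨d + 1, by rw [hstep]; exact hIH, by omega⟩
            | true =>
              rw [hres] at hIH
              obtain ⟨hlen, hdep⟩ := hIH
              have hd1 : ¬ (d + 1 - 1 < 0) := by omega
              have hdep' : vrDepth d ('{' :: cs) = vrDepth d r' := by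
                rw [hstep, hdep, if_neg hd1]
                norm_num
              have hred : vrSeqF (f + 1) ('{' :: cs) = vrSeqF f r' := by
                rw [hseq, hres]
              have hr' : r'.length ≤ f := by omega
              have hIH2 := ih r' hr' d hd
              rw [hred]
              cases hres2 : vrSeqF f r' with
              | none =>
                rw [hres2] at hIH2
                obtain ⟨e, he, hlt⟩ := hIH2
                exact ⟨e, by rw [hdep']; exact he, hlt⟩
              | some pr2 =>
                obtain ⟨b2, r2'⟩ := pr2
                cases b2 with
                | false =>
                  rw [hres2] at hIH2
                  rw [hdep']; exact hIH2
                | true =>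
                  rw [hres2] at hIH2
                  obtain ⟨hlen2, hdep2⟩ := hIH2
                  exact ⟨by simp; omega, by rw [hdep']; exact hdep2⟩
        · have hstep : vrDepth d (c :: cs) = vrDepth d cs := by
            simp [vrDepth, h1, h2]
          have hred : vrSeqF (f + 1) (c :: cs) = vrSeqF f cs := by
            simp [vrSeqF, h1, h2]
          have hIH := ih cs hcs d hd
          rw [hred]
          cases hres : vrSeqF f cs with
          | none =>
            rw [hres] at hIH
            obtain ⟨e, he, hlt⟩ := hIH
            exact ⟨e, by rw [hstep]; exact he, hlt⟩
          | some pr =>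
            obtain ⟨b, r'⟩ := pr
            cases b with
            | false =>
              rw [hres] at hIH
              rw [hstep]; exact hIH
            | true =>
              rw [hres] at hIH
              obtain ⟨hlen, hdep⟩ := hIH
              exact ⟨by simp; omega, by rw [hstep]; exact hdep⟩

-- a positive final balance forces '{' to occur in the route
theorem vrMem_of_depth_pos (route : String) (e : Int)
    (h : vrDepth 0 route.toList = some e) (hpos : 0 < e) :
    PySem.Str.isIn "{" route = true := by
  have hc := vrDepth_spec route.toList 0 e h
  have hcount : 0 < route.toList.count '{' := by
    by_contra hc0
    have h0 : route.toList.count '{' = 0 := by omega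
    rw [h0] at hc
    have : (0 : Int) ≤ (route.toList.count '}' : Int) := by positivity
    omega
  have hmem : '{' ∈ route.toList := List.count_pos_iff.mp hcount
  rw [PySem.Str.isIn_iff_infix]
  obtain ⟨pre, suf, hps⟩ := List.append_of_mem hmem
  exact ⟨pre, suf, by simpa using hps.symm⟩

-- ===== VERDICT (by name: the statement is the Claim_ definition above) =====
theorem validate_route_spec : Claim_equal_validate_route := by
  intro route _
  unfold Spec_validate_route validate_route validate_route_alt
  by_cases hg : (PySem.Str.endswith route "/" || PySem.Str.isIn "//" route) = true
  · rw [if_pos hg, if_pos (by simp only [hg, Bool.true_or])]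
  · have hgf : PySem.Chars.endswith route.toList ['/'] = false ∧
        PySem.Chars.isIn ['/', '/'] route.toList = false := by
      simpa using hg
    obtain ⟨hEnd, hSl⟩ := hgf
    rw [if_neg hg, vrLoopA_eq route route.toList none 0]
    by_cases hbb : (PySem.Str.isIn "{{" route || PySem.Str.isIn "}}" route) = true
    · have hbb' : PySem.Chars.isIn ['{', '{'] route.toList = true ∨
          PySem.Chars.isIn ['}', '}'] route.toList = true := by
        simpa using hbb
      have hBg : (PySem.Str.endswith route "/" || PySem.Str.isIn "//" route
          || PySem.Str.isIn "{{" route || PySem.Str.isIn "}}" route) = true := by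
        rcases hbb' with h | h <;> simp [h]
      rw [if_pos hBg]
      have hpair : vrPairFrom none route.toList = true := by
        rw [vrPairFrom_none, vrPairBad_iff]
        rcases hbb' with h | h
        · exact ⟨'{', by simp, (PySem.Chars.isIn_iff_infix _ _).mp h⟩
        · exact ⟨'}', by simp, (PySem.Chars.isIn_iff_infix _ _).mp h⟩
      rw [if_pos hpair]
    · have hbf : PySem.Chars.isIn ['{', '{'] route.toList = false ∧
          PySem.Chars.isIn ['}', '}'] route.toList = false := by
        simpa using hbb
      obtain ⟨hB1, hB2⟩ := hbf
      have hpair : vrPairFrom none route.toList = false := by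
        rw [Bool.eq_false_iff]
        intro hp
        rw [vrPairFrom_none, vrPairBad_iff] at hp
        obtain ⟨c, hc, hinf⟩ := hp
        simp only [List.mem_cons, List.not_mem_nil, or_false] at hc
        rcases hc with rfl | rfl | rfl
        · rw [(PySem.Chars.isIn_iff_infix _ _).mpr hinf] at hB1; simp at hB1
        · rw [(PySem.Chars.isIn_iff_infix _ _).mpr hinf] at hB2; simp at hB2
        · rw [(PySem.Chars.isIn_iff_infix _ _).mpr hinf] at hSl; simp at hSl
      rw [if_neg (by simp [hpair]), if_neg (by simp; exact ⟨⟨⟨hEnd, hSl⟩, hB1⟩, hB2⟩)]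
      have hchar := vrSeqF_char route.toList.length route.toList le_rfl 0 le_rfl
      cases hres : vrSeqF route.toList.length route.toList with
      | none =>
        rw [hres] at hchar
        obtain ⟨e, he, hlt⟩ := hchar
        rw [Nat.cast_zero, he]
        have hne : ¬ (e = 0 ∧ PySem.Str.count route "{" = PySem.Str.count route "}") := by
          rintro ⟨h0, -⟩; omega
        simp only [decide_eq_false hne]
        rw [vrMem_of_depth_pos route e he hlt]
      | some pr =>
        obtain ⟨b, r⟩ := pr
        cases b with
        | false =>
          rw [hres] at hchar
          rw [Nat.cast_zero, hchar]
          have hcnt : route.toList.count '{' = route.toList.count '}' := by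
            have := vrDepth_spec route.toList 0 0 hchar
            omega
          simp [vrCount_singleton, PySem.Str.count, hcnt]
        | true =>
          rw [hres] at hchar
          obtain ⟨hlen, hdep⟩ := hchar
          rw [Nat.cast_zero, hdep, if_pos (by norm_num)]
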